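-- pv_equiv track=rewrite | github.com/LiFE-124C41/reach-conn-checker | reach_conn_checker/yaku_rules.py | _check_sanshoku_douko
-- ===== SOURCE A (Python) =====
-- def _check_sanshoku_douko(melds):
--     # Three Colour Triplets
--     triplet_starts = []
--     for m_type, m_tiles in melds:
--         if m_type == 'koutsu':
--             triplet_starts.append(m_tiles[0])
--
--     bases_m = [x for x in triplet_starts if 1 <= x <= 9]
--     bases_p = [x-10 for x in triplet_starts if 11 <= x <= 19]
--     bases_s = [x-20 for x in triplet_starts if 21 <= x <= 29]
--
--     for b in bases_m:
--         if b in bases_p and b in bases_s: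
--             return True
--     return False
-- ===== SOURCE B (Python) =====
-- def _check_sanshoku_douko(melds):
--     # Three Colour Triplets: candidate-driven scan -- for each base 1..9,
--     # check all three suits have a koutsu starting at it.
--     def has_koutsu(tile):
--         return any(t == 'koutsu' and tiles[0] == tile for t, tiles in melds)
--     return any(has_koutsu(b) and has_koutsu(b + 10) and has_koutsu(b + 20)
--                for b in range(1, 10))
-- ===== Notes on version B (the rewrite author's own statement) =====
-- stated objective: simpler
-- what changed: Instead of partitioning koutsu starts into three suit lists and nested membership scans, B loops over the nine candidate base numbers and checks directly whether melds contains a koutsu starting at b, b+10 and b+20.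
import Mathlib
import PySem

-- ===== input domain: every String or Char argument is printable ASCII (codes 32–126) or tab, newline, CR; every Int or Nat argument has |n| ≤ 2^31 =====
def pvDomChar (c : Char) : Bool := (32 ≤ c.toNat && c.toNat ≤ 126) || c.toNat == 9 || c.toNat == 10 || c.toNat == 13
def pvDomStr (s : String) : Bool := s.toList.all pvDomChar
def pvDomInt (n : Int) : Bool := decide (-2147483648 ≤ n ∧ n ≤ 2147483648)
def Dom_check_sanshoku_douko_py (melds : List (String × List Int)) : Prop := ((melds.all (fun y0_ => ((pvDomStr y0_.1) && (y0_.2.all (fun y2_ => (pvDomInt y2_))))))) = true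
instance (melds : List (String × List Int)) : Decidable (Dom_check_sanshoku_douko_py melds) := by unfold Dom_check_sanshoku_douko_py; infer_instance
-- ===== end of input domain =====

-- ===== PORT A =====
-- B differs from A by a candidate-driven scan instead of partition + nested membership; objective: simpler.
-- g0: tiles[0]; Python raises IndexError on an empty list, excluded by Pre_ below.
def pvG0 (tiles : List Int) : Int := (PySem.List.pyGet? tiles 0).getD 0

def check_sanshoku_douko_py (melds : List (String × List Int)) : Bool :=
  let triplet_starts := melds.foldl
    (fun acc m => if m.1 == "koutsu" then acc ++ [pvG0 m.2] else acc) []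
  let bases_m := triplet_starts.filter (fun x => decide (1 ≤ x ∧ x ≤ 9))
  let bases_p := (triplet_starts.filter (fun x => decide (11 ≤ x ∧ x ≤ 19))).map (fun x => x - 10)
  let bases_s := (triplet_starts.filter (fun x => decide (21 ≤ x ∧ x ≤ 29))).map (fun x => x - 20)
  bases_m.any (fun b => bases_p.contains b && bases_s.contains b)

-- ===== PORT B =====
def pvHasKoutsu (melds : List (String × List Int)) (tile : Int) : Bool :=
  melds.any (fun m => m.1 == "koutsu" && pvG0 m.2 == tile)

def check_sanshoku_douko_py_alt (melds : List (String × List Int)) : Bool :=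
  (PySem.List.pyRange 1 10 1).any (fun b =>
    pvHasKoutsu melds b && (pvHasKoutsu melds (b + 10) && pvHasKoutsu melds (b + 20)))

-- ===== PRECONDITION & SPEC =====
-- Pre_ excludes exactly the inputs where Python A raises IndexError (a 'koutsu' meld with an
-- empty tile list); B raises there too.
def Pre_check_sanshoku_douko_py (melds : List (String × List Int)) : Prop :=
  ∀ m ∈ melds, m.1 = "koutsu" → m.2 ≠ []
instance (melds : List (String × List Int)) : Decidable (Pre_check_sanshoku_douko_py melds) := by
  unfold Pre_check_sanshoku_douko_py; infer_instance

def pvWitness_check_sanshoku_douko_py : (List (String × List Int)) :=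
  [("koutsu", [1]), ("koutsu", [11]), ("shuntsu", [21, 22, 23])]

def Spec_check_sanshoku_douko_py (melds : List (String × List Int)) (out : Bool) : Prop := out = check_sanshoku_douko_py_alt melds
instance (melds : List (String × List Int)) (out : Bool) : Decidable (Spec_check_sanshoku_douko_py melds out) := by unfold Spec_check_sanshoku_douko_py; infer_instance

-- ===== CLAIM (what is proved, stated in full; the proofs are below) =====
def Claim_equal_check_sanshoku_douko_py : Prop := ∀ (melds : List (String × List Int)), Dom_check_sanshoku_douko_py melds → Pre_check_sanshoku_douko_py melds → Spec_check_sanshoku_douko_py melds (check_sanshoku_douko_py melds)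

-- ===== LEMMAS AND PROOFS =====

theorem pvBeqComm (a b : Int) : (a == b) = (b == a) := by
  rw [Bool.eq_iff_iff, beq_iff_eq, beq_iff_eq]; exact eq_comm

-- B's generator scan equals membership in A's collected triplet starts
theorem pvHasKoutsu_eq (melds : List (String × List Int)) (tile : Int) :
    pvHasKoutsu melds tile
    = ((melds.filter (fun m => m.1 == "koutsu")).map (fun m => pvG0 m.2)).contains tile := by
  unfold pvHasKoutsu
  induction melds with
  | nil => rfl
  | cons m ms ih =>
    simp only [List.any_cons, List.filter_cons]
    by_cases h : (m.1 == "koutsu") = true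
    · simp only [h, if_pos, List.map_cons, List.contains_cons, Bool.true_and, ih]
      rw [pvBeqComm]
    · simp only [h, Bool.false_and, Bool.false_or, ih, if_neg, Bool.not_eq_true]

-- partition + nested membership over any start list S equals the candidate loop over 1..9
theorem pvCore (S : List Int) :
    ((S.filter (fun x => decide (1 ≤ x ∧ x ≤ 9))).any (fun b =>
       ((S.filter (fun x => decide (11 ≤ x ∧ x ≤ 19))).map (fun x => x - 10)).contains b &&
       ((S.filter (fun x => decide (21 ≤ x ∧ x ≤ 29))).map (fun x => x - 20)).contains b))
    = (PySem.List.pyRange 1 10 1).any (fun b =>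
        S.contains b && (S.contains (b + 10) && S.contains (b + 20))) := by
  rw [Bool.eq_iff_iff]
  simp only [List.any_eq_true, List.mem_filter, List.mem_map, PySem.List.mem_pyRange_one,
    Bool.and_eq_true, List.contains_iff_mem, decide_eq_true_eq]
  constructor
  · rintro ⟨b, ⟨hbS, hb1, hb9⟩, ⟨y, ⟨hyS, hy⟩, hye⟩, ⟨z, ⟨hzS, hz⟩, hze⟩⟩
    refine ⟨b, ⟨by omega, by omega⟩, hbS, ?_, ?_⟩
    · have : y = b + 10 := by omega
      rwa [← this]
    · have : z = b + 20 := by omega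
      rwa [← this]
  · rintro ⟨b, ⟨hb1, hb9⟩, hbS, hpS, hsS⟩
    exact ⟨b, ⟨hbS, hb1, by omega⟩, ⟨b + 10, ⟨hpS, by omega⟩, by omega⟩,
      ⟨b + 20, ⟨hsS, by omega⟩, by omega⟩⟩

theorem pvMain (melds : List (String × List Int)) :
    check_sanshoku_douko_py melds = check_sanshoku_douko_py_alt melds := by
  unfold check_sanshoku_douko_py check_sanshoku_douko_py_alt
  rw [PySem.List.foldl_append_if]
  simp only [List.nil_append, pvHasKoutsu_eq]
  exact pvCore _

-- ===== VERDICT (by name: the statement is the Claim_ definition above) =====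
theorem check_sanshoku_douko_py_spec : Claim_equal_check_sanshoku_douko_py := by
  intro melds _ _
  exact pvMain melds
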